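-- pv_equiv track=rewrite | github.com/laurent-leconte/advent-of-code | 2025/day3.py | find_largest_pair
-- ===== SOURCE A (Python) =====
-- def find_largest_pair(digits: list[int]) -> int:
--     first, second = -1, -1
--     n = len(digits)
--     for idx, d in enumerate(digits):
--         if d > first and idx < n-1:
--             # new best first digit. Store it and reset second digit
--             first = d
--             second = -1
--             continue
--         if d > second:
--             second = d
--     return first * 10 + second
-- ===== SOURCE B (Python) =====
-- def find_largest_pair(digits: list[int]) -> int:
--     # Two explicit passes: first pass finds the best first digit (max of digits[:-1],
--     # floor -1, first occurrence index p); second pass takes the max (floor -1) of the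
--     # suffix after p.
--     first, p = -1, -1
--     for i in range(len(digits) - 1):
--         if digits[i] > first:
--             first, p = digits[i], i
--     second = -1
--     for d in digits[p + 1:]:
--         if d > second:
--             second = d
--     return first * 10 + second
-- ===== Notes on version B (the rewrite author's own statement) =====
-- stated objective: simpler
-- what changed: Replaces the single stateful scan with reset-on-new-max by two independent passes: an index scan of digits[:-1] for the best first digit and its first-occurrence position p, then a plain max over the suffix digits[p+1:] for the second digit.
import Mathlib
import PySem

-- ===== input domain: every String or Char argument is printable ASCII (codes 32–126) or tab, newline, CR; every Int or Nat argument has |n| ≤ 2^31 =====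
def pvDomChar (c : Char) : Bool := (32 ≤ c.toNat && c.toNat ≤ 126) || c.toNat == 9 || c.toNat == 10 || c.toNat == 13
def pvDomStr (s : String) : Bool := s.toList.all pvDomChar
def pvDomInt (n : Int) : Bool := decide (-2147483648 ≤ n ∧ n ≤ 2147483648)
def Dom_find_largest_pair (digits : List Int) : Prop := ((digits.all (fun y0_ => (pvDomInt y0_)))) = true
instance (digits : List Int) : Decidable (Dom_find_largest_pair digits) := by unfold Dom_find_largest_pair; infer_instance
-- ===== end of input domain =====

-- B computes the same value with two independent passes (best first digit of digits[:-1]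
-- with its first-occurrence index, then a plain max over the suffix) instead of A's single
-- stateful scan with reset; objective: simpler.


-- ===== PORT A =====
-- for idx, d in enumerate(digits): if d > first and idx < n-1: … elif-style second branch
def find_largest_pair (digits : List Int) : Int :=
  let n : Int := digits.length
  let fs := (PySem.List.enumerate digits).foldl
    (fun (st : Int × Int) (p : Int × Int) =>
      if p.2 > st.1 ∧ p.1 < n - 1 then (p.2, -1)
      else if p.2 > st.2 then (st.1, p.2)
      else st) (-1, -1)
  fs.1 * 10 + fs.2

-- ===== PORT B =====
-- pass 1: for i in range(len(digits)-1): track (first, p); pass 2: max over digits[p+1:]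
-- (digits[i] is always in range here, so pyGetD with default 0 is exact)
def find_largest_pair_alt (digits : List Int) : Int :=
  let fp := (PySem.List.pyRange 0 ((digits.length : Int) - 1) 1).foldl
    (fun (st : Int × Int) (i : Int) =>
      if PySem.List.pyGetD digits i 0 > st.1 then (PySem.List.pyGetD digits i 0, i) else st)
    (-1, -1)
  let second := (PySem.List.slice digits (some (fp.2 + 1)) none).foldl
    (fun (s : Int) (d : Int) => if d > s then d else s) (-1)
  fp.1 * 10 + second

-- ===== PRECONDITION & SPEC =====
def Spec_find_largest_pair (digits : List Int) (out : Int) : Prop := out = find_largest_pair_alt digits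
instance (digits : List Int) (out : Int) : Decidable (Spec_find_largest_pair digits out) := by unfold Spec_find_largest_pair; infer_instance

-- ===== CLAIM (what is proved, stated in full; the proofs are below) =====
def Claim_equal_find_largest_pair : Prop := ∀ (digits : List Int), Dom_find_largest_pair digits → Spec_find_largest_pair digits (find_largest_pair digits)

-- ===== LEMMAS AND PROOFS =====

-- A's loop body (n = len(digits)), and its body with the index condition known true
def stepA (n : Int) (st p : Int × Int) : Int × Int :=
  if p.2 > st.1 ∧ p.1 < n - 1 then (p.2, -1) else if p.2 > st.2 then (st.1, p.2) else st

def stepH (st : Int × Int) (d : Int) : Int × Int :=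
  if d > st.1 then (d, -1) else if d > st.2 then (st.1, d) else st

-- B's first-pass loop body, on (index, value) pairs
def stepF (st : Int × Int) (p : Int × Int) : Int × Int :=
  if p.2 > st.1 then (p.2, p.1) else st

def aFold (digits : List Int) : Int × Int :=
  (PySem.List.enumerate digits).foldl (stepA (digits.length : Int)) (-1, -1)

def bScan (digits : List Int) : Int × Int :=
  (PySem.List.pyRange 0 ((digits.length : Int) - 1) 1).foldl
    (fun st i => stepF st (i, PySem.List.pyGetD digits i 0)) (-1, -1)

def fpScan (l : List Int) : Int × Int :=
  (PySem.List.enumerate l).foldl stepF (-1, -1)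

def mx (l : List Int) (s : Int) : Int := l.foldl (fun s d => if d > s then d else s) s

-- the common value both programs compute
def canon (digits : List Int) : Int :=
  (fpScan digits.dropLast).1 * 10 +
    mx (digits.drop ((fpScan digits.dropLast).2 + 1).toNat) (-1)

theorem A_unfold (digits : List Int) :
    find_largest_pair digits = (aFold digits).1 * 10 + (aFold digits).2 := rfl

theorem B_unfold (digits : List Int) :
    find_largest_pair_alt digits =
      (bScan digits).1 * 10 +
        mx (PySem.List.slice digits (some ((bScan digits).2 + 1)) none) (-1) := rfl

theorem fpScan_append (l : List Int) (x : Int) :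
    fpScan (l ++ [x]) = if x > (fpScan l).1 then (x, (l.length : Int)) else fpScan l := by
  simp [fpScan, PySem.List.enumerate_append, List.foldl_append, stepF]

theorem fpScan_bounds (l : List Int) :
    -1 ≤ (fpScan l).2 ∧ (fpScan l).2 < (l.length : Int) ∨ fpScan l = (-1, -1) := by
  induction l using List.reverseRecOn with
  | nil => right; rfl
  | append_singleton l x ih =>
    rw [fpScan_append]
    split_ifs with h
    · left; constructor <;> simp
    · rcases ih with ⟨h1, h2⟩ | h3
      · left; refine ⟨h1, ?_⟩; simp; omega
      · right; exact h3

theorem fpScan_snd_le (l : List Int) :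
    -1 ≤ (fpScan l).2 ∧ (fpScan l).2 + 1 ≤ (l.length : Int) := by
  rcases fpScan_bounds l with ⟨h1, h2⟩ | h3
  · exact ⟨h1, by omega⟩
  · rw [h3]; simp

theorem mx_append (l : List Int) (x s : Int) :
    mx (l ++ [x]) s = if x > mx l s then x else mx l s := by
  simp [mx, List.foldl_append]

theorem core (l : List Int) :
    l.foldl stepH (-1, -1) = ((fpScan l).1, mx (l.drop ((fpScan l).2 + 1).toNat) (-1)) := by
  induction l using List.reverseRecOn with
  | nil => rfl
  | append_singleton l x ih =>
    rw [List.foldl_append, ih, fpScan_append]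
    by_cases h : x > (fpScan l).1
    · rw [if_pos h]
      have hnat : ((l.length : Int) + 1).toNat = l.length + 1 := by omega
      simp [stepH, h, hnat, List.drop_eq_nil_of_le, mx]
    · rw [if_neg h]
      have hle := fpScan_snd_le l
      have hk : ((fpScan l).2 + 1).toNat ≤ l.length := by omega
      rw [List.drop_append_of_le_length hk, mx_append]
      by_cases h2 : x > mx (l.drop ((fpScan l).2 + 1).toNat) (-1) <;>
        simp [stepH, h, h2]

theorem aFold_prefix (l : List Int) (x : Int) :
    (PySem.List.enumerate l).foldl (stepA ((l ++ [x]).length : Int)) (-1, -1)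
      = l.foldl stepH (-1, -1) := by
  have hcongr : (PySem.List.enumerate l).foldl (stepA ((l ++ [x]).length : Int)) (-1, -1)
      = (PySem.List.enumerate l).foldl (fun st p => stepH st p.2) (-1, -1) := by
    apply PySem.List.foldl_congr_mem
    intro acc p hp
    rw [PySem.List.mem_enumerate_iff] at hp
    obtain ⟨k, hk, rfl⟩ := hp
    simp [stepA, stepH, hk]
  rw [hcongr]
  conv_rhs => rw [← PySem.List.map_snd_enumerate l 0]
  rw [List.foldl_map]

theorem A_eq_canon (digits : List Int) : find_largest_pair digits = canon digits := by
  induction digits using List.reverseRecOn with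
  | nil => rfl
  | append_singleton l x ih =>
    rw [A_unfold]
    unfold aFold
    rw [PySem.List.enumerate_append, List.foldl_append, aFold_prefix, core]
    have hidx : ¬ ((0 : Int) + (l.length : Int) < ((l ++ [x]).length : Int) - 1) := by
      simp
    have hle := fpScan_snd_le l
    have hk : ((fpScan l).2 + 1).toNat ≤ l.length := by omega
    unfold canon
    rw [List.dropLast_concat, List.drop_append_of_le_length hk, mx_append]
    simp only [PySem.List.enumerate_cons, PySem.List.enumerate_nil, List.foldl_cons,
      List.foldl_nil, stepA, hidx, and_false, if_false]
    by_cases h2 : x > mx (l.drop ((fpScan l).2 + 1).toNat) (-1) <;> simp [h2]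

theorem fpScan_eq_pyRange (l : List Int) :
    fpScan l = (PySem.List.pyRange 0 (l.length : Int) 1).foldl
      (fun st i => stepF st (i, PySem.List.pyGetD l i 0)) (-1, -1) := by
  unfold fpScan
  rw [PySem.List.enumerate_eq_map_pyRange l 0, List.foldl_map]
  simp only [PySem.List.len_eq]

theorem bScan_eq (digits : List Int) : bScan digits = fpScan digits.dropLast := by
  induction digits using List.reverseRecOn with
  | nil =>
    have : bScan [] = (-1, -1) := by
      unfold bScan
      norm_num [PySem.List.pyRange]
    rw [this]; rfl
  | append_singleton l x ih =>
    unfold bScan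
    have hlen : (((l ++ [x]).length : Int)) - 1 = (l.length : Int) := by simp
    rw [hlen, List.dropLast_concat, fpScan_eq_pyRange]
    apply PySem.List.foldl_congr_mem
    intro acc i hi
    rw [PySem.List.mem_pyRange_one] at hi
    obtain ⟨h0, h1⟩ := hi
    have hget : PySem.List.pyGetD (l ++ [x]) i 0 = PySem.List.pyGetD l i 0 := by
      rw [PySem.List.pyGetD_eq_getElem (l ++ [x]) 0 h0 (by simp; omega),
          PySem.List.pyGetD_eq_getElem l 0 h0 (by exact_mod_cast h1)]
      exact List.getElem_append_left (by omega)
    rw [hget]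

theorem B_eq_canon (digits : List Int) : find_largest_pair_alt digits = canon digits := by
  rw [B_unfold, bScan_eq]
  have hle := fpScan_snd_le digits.dropLast
  rw [PySem.List.slice_from digits (by omega : (0:Int) ≤ (fpScan digits.dropLast).2 + 1)]
  rfl

-- ===== VERDICT (by name: the statement is the Claim_ definition above) =====
theorem find_largest_pair_spec : Claim_equal_find_largest_pair := by
  intro digits _
  unfold Spec_find_largest_pair
  rw [A_eq_canon, B_eq_canon]
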